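-- pv_equiv track=rewrite | github.com/baptistejeh07-art/finsight-ia | data/sources/edgar_source.py | _extract_relevant_sections
-- ===== SOURCE A (Python) =====
-- _KEYWORDS_BY_PROFILE = {
--     "BANK": [
--         "net interest margin", "nim", "net interest income", "cet1",
--         "common equity tier", "npl", "non-performing", "nonperforming",
--         "provision for credit", "cost-to-income", "efficiency ratio",
--         "tier 1 capital", "risk-weighted", "liquidity coverage",
--     ],
--     "INSURANCE": [
--         "combined ratio", "loss ratio", "expense ratio", "net premiums",
--         "solvency", "embedded value", "policyholder", "underwriting",
--         "claims", "reserve", "statutory capital",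
--     ],
--     "REIT": [
--         "funds from operations", "ffo", "affo", "adjusted funds",
--         "net operating income", "noi", "occupancy", "same-store",
--         "same-property", "cap rate", "capitalization rate",
--         "weighted average lease term", "walt", "nav", "net asset value",
--     ],
--     "UTILITY": [
--         "rate base", "regulated asset", "rab", "allowed return",
--         "allowed roe", "rate case", "regulatory", "tariff",
--         "rate of return", "capital expenditure program",
--     ],
--     "OIL_GAS": [
--         "proved reserves", "probable reserves", "production",
--         "barrels of oil equivalent", "boe", "finding and development",
--         "f&d cost", "reserve replacement", "breakeven",
--         "lifting cost", "netback",
--     ],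
-- }
--
-- def _extract_relevant_sections(full_text: str, profile: str, max_chars: int = 15000) -> str:
--     """Extrait les sections pertinentes du 10-K pour le profil sectoriel.
--
--     Parcourt le texte par blocs de ~500 caractères et retient ceux qui
--     contiennent des mots-clés sectoriels. Retourne un texte condensé
--     de max_chars caractères.
--     """
--     keywords = _KEYWORDS_BY_PROFILE.get(profile, [])
--     if not keywords:
--         return full_text[:max_chars]
--
--     text_lower = full_text.lower()
--     block_size = 500
--     scored_blocks = []
--
--     for i in range(0, len(full_text), block_size):
--         block = full_text[i:i + block_size]
--         block_lower = text_lower[i:i + block_size]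
--         score = sum(1 for kw in keywords if kw in block_lower)
--         if score > 0:
--             scored_blocks.append((score, block))
--
--     # Trier par pertinence et prendre les meilleurs blocs
--     scored_blocks.sort(key=lambda x: x[0], reverse=True)
--     result = []
--     total = 0
--     for score, block in scored_blocks:
--         if total + len(block) > max_chars:
--             break
--         result.append(block)
--         total += len(block)
--
--     return "\n...\n".join(result) if result else full_text[:max_chars]
-- ===== SOURCE B (Python) =====
-- _KEYWORDS_BY_PROFILE = {
--     "BANK": [
--         "net interest margin", "nim", "net interest income", "cet1",
--         "common equity tier", "npl", "non-performing", "nonperforming",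
--         "provision for credit", "cost-to-income", "efficiency ratio",
--         "tier 1 capital", "risk-weighted", "liquidity coverage",
--     ],
--     "INSURANCE": [
--         "combined ratio", "loss ratio", "expense ratio", "net premiums",
--         "solvency", "embedded value", "policyholder", "underwriting",
--         "claims", "reserve", "statutory capital",
--     ],
--     "REIT": [
--         "funds from operations", "ffo", "affo", "adjusted funds",
--         "net operating income", "noi", "occupancy", "same-store",
--         "same-property", "cap rate", "capitalization rate",
--         "weighted average lease term", "walt", "nav", "net asset value",
--     ],
--     "UTILITY": [
--         "rate base", "regulated asset", "rab", "allowed return",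
--         "allowed roe", "rate case", "regulatory", "tariff",
--         "rate of return", "capital expenditure program",
--     ],
--     "OIL_GAS": [
--         "proved reserves", "probable reserves", "production",
--         "barrels of oil equivalent", "boe", "finding and development",
--         "f&d cost", "reserve replacement", "breakeven",
--         "lifting cost", "netback",
--     ],
-- }
--
--
-- def _pop_best(scored):
--     """Split off the first highest-scoring entry: returns (entry, rest)."""
--     best = 0
--     for j in range(1, len(scored)):
--         if scored[j][0] > scored[best][0]:
--             best = j
--     return scored[best], scored[:best] + scored[best + 1:]
--
--
-- def _extract_relevant_sections(full_text, profile, max_chars=15000):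
--     """Selection variant: instead of sorting the scored blocks and then cutting
--     greedily, repeatedly pop the first highest-scoring remaining block and stop
--     as soon as it would overflow the budget (no sort at all)."""
--     keywords = _KEYWORDS_BY_PROFILE.get(profile, [])
--     if not keywords:
--         return full_text[:max_chars]
--
--     scored = []
--     pos = 0
--     while pos < len(full_text):
--         block = full_text[pos:pos + 500]
--         low = block.lower()
--         score = sum(kw in low for kw in keywords)
--         if score:
--             scored.append((score, block))
--         pos += 500
--
--     result = []
--     total = 0
--     while scored:
--         (_, block), scored = _pop_best(scored)
--         if total + len(block) > max_chars:
--             break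
--         result.append(block)
--         total += len(block)
--
--     return "\n...\n".join(result) if result else full_text[:max_chars]
-- ===== Notes on version B (the rewrite author's own statement) =====
-- stated objective: alternative
-- what changed: Replaces the sort-then-greedy pipeline (collect (score, block) tuples, list.sort reverse, then cut) with a sort-free selection loop that repeatedly pops the first highest-scoring remaining block and stops when the budget would overflow; the scan also becomes a while-loop that lowercases each block itself instead of slicing a precomputed lowercase copy.
import Mathlib
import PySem

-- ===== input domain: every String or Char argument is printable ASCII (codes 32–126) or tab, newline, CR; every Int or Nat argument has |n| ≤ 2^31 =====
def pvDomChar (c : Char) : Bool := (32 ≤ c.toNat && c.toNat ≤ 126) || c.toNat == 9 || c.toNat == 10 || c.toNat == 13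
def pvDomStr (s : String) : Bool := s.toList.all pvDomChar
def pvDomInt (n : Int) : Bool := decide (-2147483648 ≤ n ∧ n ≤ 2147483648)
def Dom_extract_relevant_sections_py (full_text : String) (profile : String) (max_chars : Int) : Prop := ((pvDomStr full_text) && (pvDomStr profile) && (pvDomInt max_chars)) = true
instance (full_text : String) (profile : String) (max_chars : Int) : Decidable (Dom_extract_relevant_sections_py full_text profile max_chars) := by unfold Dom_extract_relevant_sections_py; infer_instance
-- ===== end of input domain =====

-- B replaces A's sort-then-greedy pipeline by a sort-free selection loop: it
-- repeatedly pops the first highest-scoring remaining block and stops when the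
-- budget would overflow. Objective: alternative algorithm (not claimed faster).

-- module constant _KEYWORDS_BY_PROFILE (shared context of both programs)
def pvKeywordsByProfile : PySem.Dict String (List String) :=
  ⟨[("BANK",
    ["net interest margin", "nim", "net interest income", "cet1",
     "common equity tier", "npl", "non-performing", "nonperforming",
     "provision for credit", "cost-to-income", "efficiency ratio",
     "tier 1 capital", "risk-weighted", "liquidity coverage"]),
   ("INSURANCE",
    ["combined ratio", "loss ratio", "expense ratio", "net premiums",
     "solvency", "embedded value", "policyholder", "underwriting",
     "claims", "reserve", "statutory capital"]),
   ("REIT",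
    ["funds from operations", "ffo", "affo", "adjusted funds",
     "net operating income", "noi", "occupancy", "same-store",
     "same-property", "cap rate", "capitalization rate",
     "weighted average lease term", "walt", "nav", "net asset value"]),
   ("UTILITY",
    ["rate base", "regulated asset", "rab", "allowed return",
     "allowed roe", "rate case", "regulatory", "tariff",
     "rate of return", "capital expenditure program"]),
   ("OIL_GAS",
    ["proved reserves", "probable reserves", "production",
     "barrels of oil equivalent", "boe", "finding and development",
     "f&d cost", "reserve replacement", "breakeven",
     "lifting cost", "netback"])]⟩

-- ===== PORT A =====
def extract_relevant_sections_py (full_text : String) (profile : String) (max_chars : Int) : String :=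
  let keywords := PySem.Dict.getD pvKeywordsByProfile profile []
  if keywords = [] then
    PySem.Str.slice full_text none (some max_chars)
  else
    let text_lower := PySem.Str.lower full_text
    let block_size : Int := 500
    let scored_blocks : List (Int × String) :=
      (PySem.List.pyRange 0 (PySem.Str.len full_text) block_size).foldl
        (fun scored_blocks i =>
          let block := PySem.Str.slice full_text (some i) (some (i + block_size))
          let block_lower := PySem.Str.slice text_lower (some i) (some (i + block_size))
          let score : Int :=
            (keywords.map (fun kw => if PySem.Str.isIn kw block_lower then (1 : Int) else 0)).sum
          if score > 0 then scored_blocks ++ [(score, block)] else scored_blocks) []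
    -- scored_blocks.sort(key=lambda x: x[0], reverse=True)  (in-place sort of the local list)
    let sorted_blocks := PySem.List.sorted scored_blocks (fun x => x.1) true
    -- greedy accumulation with break, modelled by a stopped flag
    let fin : List String × Int × Bool :=
      sorted_blocks.foldl
        (fun (acc : List String × Int × Bool) p =>
          if acc.2.2 then acc
          else if acc.2.1 + PySem.Str.len p.2 > max_chars then (acc.1, acc.2.1, true)
          else (acc.1 ++ [p.2], acc.2.1 + PySem.Str.len p.2, false)) ([], 0, false)
    if fin.1 = [] then PySem.Str.slice full_text none (some max_chars)
    else PySem.Str.join "\n...\n" fin.1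

-- ===== PORT B =====
-- _pop_best: index loop finding the first highest-scoring entry, then split it off
def pvPopBest (scored : List (Int × String)) : (Int × String) × List (Int × String) :=
  let best : Int :=
    (PySem.List.pyRange 1 (PySem.List.len scored) 1).foldl
      (fun best j =>
        if (PySem.List.pyGetD scored j (0, "")).1 > (PySem.List.pyGetD scored best (0, "")).1
        then j else best) 0
  (PySem.List.pyGetD scored best (0, ""),
   PySem.List.slice scored none (some best) ++ PySem.List.slice scored (some (best + 1)) none)

-- termination fact for the selection loop: _pop_best's rest is one entry shorter
lemma pvPopBest_rest_lt (scored : List (Int × String)) (h : scored ≠ []) :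
    (pvPopBest scored).2.length < scored.length := by
  have key : ∀ (L : List Int) (b0 : Int),
      (L.foldl (fun best j =>
        if (PySem.List.pyGetD scored j (0, "")).1 > (PySem.List.pyGetD scored best (0, "")).1
        then j else best) b0 = b0) ∨
      (L.foldl (fun best j =>
        if (PySem.List.pyGetD scored j (0, "")).1 > (PySem.List.pyGetD scored best (0, "")).1
        then j else best) b0 ∈ L) := by
    intro L
    induction L with
    | nil => intro b0; left; rfl
    | cons x L ih =>
        intro b0
        simp only [List.foldl_cons]
        rcases ih (if (PySem.List.pyGetD scored x (0, "")).1 > (PySem.List.pyGetD scored b0 (0, "")).1 then x else b0) with h1 | h1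
        · rw [h1]
          by_cases hc : (PySem.List.pyGetD scored x (0, "")).1 > (PySem.List.pyGetD scored b0 (0, "")).1
          · right; simp [hc]
          · left; simp [hc]
        · right; exact List.mem_cons_of_mem _ h1
  have hlen : 0 < scored.length := List.length_pos_iff.mpr h
  set best := (PySem.List.pyRange 1 (PySem.List.len scored) 1).foldl
      (fun best j =>
        if (PySem.List.pyGetD scored j (0, "")).1 > (PySem.List.pyGetD scored best (0, "")).1
        then j else best) 0 with hbest
  have hb : 0 ≤ best ∧ best < scored.length := by
    rcases key (PySem.List.pyRange 1 (PySem.List.len scored) 1) 0 with h1 | h1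
    · rw [← hbest] at h1
      constructor <;> simp [h1]; omega
    · rw [← hbest] at h1
      rw [PySem.List.mem_pyRange_one] at h1
      simp [PySem.List.len_eq] at h1
      omega
  simp only [pvPopBest]
  rw [← hbest]
  rw [PySem.List.slice_to scored hb.1, PySem.List.slice_from scored (show (0:Int) ≤ best + 1 by omega)]
  rw [List.length_append, List.length_take, List.length_drop]
  have : best.toNat < scored.length := by omega
  have h1 : (best + 1).toNat = best.toNat + 1 := by omega
  omega

-- the selection loop: pop the first best, stop when it would overflow
def pvSelect (max_chars : Int) : List (Int × String) → Int → List String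
  | [], _ => []
  | x :: rest, total =>
    let pb := pvPopBest (x :: rest)
    if total + PySem.Str.len pb.1.2 > max_chars then []
    else pb.1.2 :: pvSelect max_chars pb.2 (total + PySem.Str.len pb.1.2)
termination_by scored _ => scored.length
decreasing_by exact pvPopBest_rest_lt (x :: rest) (by simp)

-- the block scan: while-loop over positions, scoring each block's own lowercase copy
def pvScanB (full_text : String) (keywords : List String) (pos : Nat) : List (Int × String) :=
  if h : (pos : Int) < PySem.Str.len full_text then
    let block := PySem.Str.slice full_text (some (pos : Int)) (some ((pos : Int) + 500))
    let low := PySem.Str.lower block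
    let score : Int := ((keywords.countP (fun kw => PySem.Str.isIn kw low)) : Int)
    (if score ≠ 0 then [(score, block)] else []) ++ pvScanB full_text keywords (pos + 500)
  else []
termination_by (PySem.Str.len full_text).toNat - pos
decreasing_by
  rw [PySem.Str.len_eq] at h ⊢
  omega

def extract_relevant_sections_py_alt (full_text : String) (profile : String) (max_chars : Int) : String :=
  let keywords := PySem.Dict.getD pvKeywordsByProfile profile []
  if keywords = [] then
    PySem.Str.slice full_text none (some max_chars)
  else
    let scored := pvScanB full_text keywords 0
    let result := pvSelect max_chars scored 0
    if result = [] then PySem.Str.slice full_text none (some max_chars)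
    else PySem.Str.join "\n...\n" result

-- ===== PRECONDITION & SPEC =====
def Spec_extract_relevant_sections_py (full_text : String) (profile : String) (max_chars : Int) (out : String) : Prop := out = extract_relevant_sections_py_alt full_text profile max_chars
instance (full_text : String) (profile : String) (max_chars : Int) (out : String) : Decidable (Spec_extract_relevant_sections_py full_text profile max_chars out) := by unfold Spec_extract_relevant_sections_py; infer_instance

-- ===== CLAIM (what is proved, stated in full; the proofs are below) =====
def Claim_equal_extract_relevant_sections_py : Prop := ∀ (full_text : String) (profile : String) (max_chars : Int), Dom_extract_relevant_sections_py full_text profile max_chars → Spec_extract_relevant_sections_py full_text profile max_chars (extract_relevant_sections_py full_text profile max_chars)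

-- ===== LEMMAS AND PROOFS =====

-- A's per-index score and block (the scan functions both programs share)
def pvScoreA (full_text : String) (keywords : List String) (i : Int) : Int :=
  (keywords.map (fun kw =>
    if PySem.Str.isIn kw
        (PySem.Str.slice (PySem.Str.lower full_text) (some i) (some (i + 500))) = true
    then (1 : Int) else 0)).sum

def pvBlockA (full_text : String) (i : Int) : String :=
  PySem.Str.slice full_text (some i) (some (i + 500))

-- the greedy step (the loop body of A's final loop)
def pvStep (mc : Int) (acc : List String × Int × Bool) (p : Int × String) : List String × Int × Bool :=
  if acc.2.2 then acc
  else if acc.2.1 + PySem.Str.len p.2 > mc then (acc.1, acc.2.1, true)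
  else (acc.1 ++ [p.2], acc.2.1 + PySem.Str.len p.2, false)

-- once stopped, the greedy loop no longer changes its state
lemma pvStep_stopped (mc : Int) (l : List (Int × String)) (r : List String) (t : Int) :
    l.foldl (pvStep mc) (r, t, true) = (r, t, true) := by
  induction l with
  | nil => rfl
  | cons b l ih => simpa [pvStep] using ih

-- lowercasing commutes with slicing (both are per-character / positional)
lemma pvLowerSlice (s : String) (a b : Int) :
    PySem.Str.lower (PySem.Str.slice s (some a) (some b)) =
      PySem.Str.slice (PySem.Str.lower s) (some a) (some b) := by
  simp only [PySem.Str.lower, PySem.Str.slice, PySem.Chars.slice, String.toList_ofList]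
  congr 1
  simp only [PySem.Chars.lower, PySem.List.slice, List.length_map]
  rw [List.map_take, List.map_drop]

-- B's per-block score is A's per-index score
lemma pvScoreEq (full_text : String) (keywords : List String) (i : Int) :
    ((keywords.countP (fun kw =>
        PySem.Str.isIn kw (PySem.Str.lower (pvBlockA full_text i)))) : Int) =
      pvScoreA full_text keywords i := by
  rw [pvScoreA, pvBlockA, pvLowerSlice]
  exact (PySem.List.sum_map_ite_one_zero _ keywords).symm

-- a 500-step range is a cons when nonempty
lemma pvRangeCons (a b : Int) (hab : a < b) :
    PySem.List.pyRange a b 500 = a :: PySem.List.pyRange (a + 500) b 500 := by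
  rw [PySem.List.pyRange_of_pos _ _ (by norm_num : (0:Int) < 500),
      PySem.List.pyRange_of_pos _ _ (by norm_num : (0:Int) < 500)]
  rw [if_pos hab]
  have h1 : ((b - a + 500 - 1) / 500).toNat =
      (if a + 500 < b then ((b - (a + 500) + 500 - 1) / 500).toNat else 0) + 1 := by
    split_ifs with h <;> omega
  rw [h1]
  split_ifs with h
  · rw [List.range_succ_eq_map, List.map_cons, List.map_map]
    simp only [Nat.cast_zero, mul_zero, add_zero]
    congr 1
    apply List.map_congr_left
    intro k _
    simp only [Function.comp_apply, Nat.succ_eq_add_one]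
    push_cast
    ring
  · rw [List.range_succ_eq_map]
    simp

lemma pvRangeNil (a b s : Int) (hs : 0 < s) (hab : b ≤ a) :
    PySem.List.pyRange a b s = [] := by
  rw [PySem.List.pyRange_of_pos _ _ hs, if_neg (by omega)]
  simp

-- B's scan recursion produces the filtered-and-scored suffix of the block list
lemma pvScanEqAux (full_text : String) (keywords : List String) :
    ∀ (n : Nat) (pos : Nat), (PySem.Str.len full_text).toNat - pos = n →
    pvScanB full_text keywords pos =
      ((PySem.List.pyRange (pos : Int) (PySem.Str.len full_text) 500).filter
          (fun i => decide (pvScoreA full_text keywords i > 0))).map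
        (fun i => (pvScoreA full_text keywords i, pvBlockA full_text i)) := by
  intro n
  induction n using Nat.strong_induction_on with
  | _ n ih =>
    intro pos hn
    by_cases h : (pos : Int) < PySem.Str.len full_text
    · rw [pvScanB, dif_pos h]
      have hrec := ih ((PySem.Str.len full_text).toNat - (pos + 500))
        (by omega) (pos + 500) rfl
      have hcast : ((pos : Int) + 500) = (((pos + 500 : Nat)) : Int) := by push_cast; ring
      rw [pvRangeCons _ _ h]
      simp only [List.filter_cons]
      have hsc := pvScoreEq full_text keywords (pos : Int)
      simp only [pvBlockA] at hsc
      rw [hsc, hcast, hrec]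
      by_cases hpos : pvScoreA full_text keywords (pos : Int) > 0
      · have hne : pvScoreA full_text keywords (pos : Int) ≠ 0 := by omega
        rw [if_pos hne]
        simp only [decide_eq_true_eq]
        rw [if_pos hpos, List.map_cons, List.singleton_append, pvBlockA, ← hcast]
      · have heq : pvScoreA full_text keywords (pos : Int) = 0 := by
          have : (0:Int) ≤ pvScoreA full_text keywords (pos:Int) := by
            rw [← pvScoreEq]; positivity
          omega
        rw [heq]
        simp
    · rw [pvScanB, dif_neg h]
      rw [pvRangeNil _ _ _ (by norm_num) (by omega)]
      simp

-- A's scan fold is the same filtered-and-scored list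
lemma pvScoredEq (full_text : String) (keywords : List String) :
    (PySem.List.pyRange 0 (PySem.Str.len full_text) 500).foldl
        (fun sb i =>
          if pvScoreA full_text keywords i > 0
          then sb ++ [(pvScoreA full_text keywords i, pvBlockA full_text i)] else sb) [] =
      ((PySem.List.pyRange 0 (PySem.Str.len full_text) 500).filter
          (fun i => decide (pvScoreA full_text keywords i > 0))).map
        (fun i => (pvScoreA full_text keywords i, pvBlockA full_text i)) := by
  have := PySem.List.foldl_append_if (fun i => decide (pvScoreA full_text keywords i > 0))
    (fun i => (pvScoreA full_text keywords i, pvBlockA full_text i))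
    (PySem.List.pyRange 0 (PySem.Str.len full_text) 500) []
  simpa using this

-- _pop_best really splits off the first highest-scoring entry
lemma pvPopBestSpec (l : List (Int × String)) (h : l ≠ []) :
    ∃ bn : Nat, bn < l.length ∧
      (pvPopBest l).1 = l.getD bn (0, "") ∧
      (pvPopBest l).2 = l.take bn ++ l.drop (bn + 1) ∧
      (∀ i, i < bn → (l.getD i (0, "")).1 < (l.getD bn (0, "")).1) ∧
      (∀ i, i < l.length → (l.getD i (0, "")).1 ≤ (l.getD bn (0, "")).1) := by
  have hlen : 0 < l.length := List.length_pos_iff.mpr h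
  have main : ∀ k : Nat, 1 ≤ k → k ≤ l.length →
      ∃ bn : Nat,
        (PySem.List.pyRange 1 (k : Int) 1).foldl
          (fun best j =>
            if (PySem.List.pyGetD l j (0, "")).1 > (PySem.List.pyGetD l best (0, "")).1
            then j else best) 0 = (bn : Int) ∧ bn < k ∧
        (∀ i, i < bn → (l.getD i (0, "")).1 < (l.getD bn (0, "")).1) ∧
        (∀ i, i < k → (l.getD i (0, "")).1 ≤ (l.getD bn (0, "")).1) := by
    intro k
    induction k with
    | zero => omega
    | succ k ihk =>
        intro _ hkl
        by_cases hk1 : 1 ≤ k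
        · obtain ⟨bn, hfold, hbnk, hstrict, hle⟩ := ihk hk1 (by omega)
          have hsplit : PySem.List.pyRange 1 ((k+1 : Nat) : Int) 1 =
              PySem.List.pyRange 1 (k : Int) 1 ++ [(k : Int)] := by
            push_cast
            exact PySem.List.pyRange_one_succ_right (by exact_mod_cast hk1)
          rw [hsplit, List.foldl_append, hfold]
          simp only [List.foldl_cons, List.foldl_nil, PySem.List.pyGetD_natCast]
          by_cases hc : (l.getD k (0, "")).1 > (l.getD bn (0, "")).1
          · refine ⟨k, by rw [if_pos hc], by omega, ?_, ?_⟩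
            · intro i hi
              exact lt_of_le_of_lt (hle i (by omega)) hc
            · intro i hi
              rcases Nat.lt_succ_iff_lt_or_eq.mp hi with h1 | h1
              · exact le_of_lt (lt_of_le_of_lt (hle i h1) hc)
              · subst h1; rfl
          · refine ⟨bn, by rw [if_neg hc], by omega, hstrict, ?_⟩
            intro i hi
            rcases Nat.lt_succ_iff_lt_or_eq.mp hi with h1 | h1
            · exact hle i h1
            · subst h1; omega
        · have hk0 : k = 0 := by omega
          subst hk0
          refine ⟨0, ?_, by omega, by omega, by intro i hi; interval_cases i; rfl⟩
          norm_num [PySem.List.pyRange]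
  obtain ⟨bn, hfold, hbnk, hstrict, hle⟩ := main l.length (by omega) le_rfl
  have hfold' : (PySem.List.pyRange 1 (PySem.List.len l) 1).foldl
      (fun best j =>
        if (PySem.List.pyGetD l j (0, "")).1 > (PySem.List.pyGetD l best (0, "")).1
        then j else best) 0 = (bn : Int) := by
    rw [PySem.List.len_eq]; exact_mod_cast hfold
  have h1 : (pvPopBest l).1 = l.getD bn (0, "") := by
    simp only [pvPopBest, hfold', PySem.List.pyGetD_natCast]
  have h2 : (pvPopBest l).2 = l.take bn ++ l.drop (bn + 1) := by
    simp only [pvPopBest, hfold']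
    rw [PySem.List.slice_to l (by positivity), PySem.List.slice_from l (by positivity)]
    have e1 : ((bn : Int)).toNat = bn := by omega
    have e2 : ((bn : Int) + 1).toNat = bn + 1 := by omega
    rw [e1, e2]
  exact ⟨bn, hbnk, h1, h2, hstrict, hle⟩

-- insertBy unfolding on a cons (the defining equation)
lemma pvInsertByCons {α : Type} (before : α → α → Bool) (x y : α) (ys : List α) :
    PySem.List.insertBy before x (y :: ys) =
      if before x y then x :: y :: ys else y :: PySem.List.insertBy before x ys := by
  simp [PySem.List.insertBy]

lemma pvInsertByFront {α : Type} (before : α → α → Bool) (x : α) (l : List α)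
    (h : ∀ y ∈ l, before x y = true) :
    PySem.List.insertBy before x l = x :: l := by
  cases l with
  | nil => rfl
  | cons y ys => simp [pvInsertByCons, h y (by simp)]

-- members of the insertion fold come from the seed or the input
lemma pvMemFoldlInsertBy {α : Type} (before : α → α → Bool) :
    ∀ (L : List α) (init : List α) (y : α),
      y ∈ L.foldl (fun acc x => PySem.List.insertBy before x acc) init → y ∈ init ∨ y ∈ L := by
  intro L
  induction L with
  | nil => intro init y hy; exact Or.inl hy
  | cons x L ih =>
      intro init y hy
      rcases ih _ y hy with h1 | h1
      · rw [PySem.List.mem_insertBy] at h1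
        rcases h1 with h1 | h1
        · right; simp [h1]
        · left; exact h1
      · right; simp [h1]

-- a maximal element stays in front while smaller-or-equal elements are inserted
lemma pvFoldlSkipHead (m : Int × String) :
    ∀ (post : List (Int × String)) (acc : List (Int × String)),
      (∀ x ∈ post, x.1 ≤ m.1) →
      post.foldl (fun acc x =>
        PySem.List.insertBy (fun a b => decide (b.1 < a.1)) x acc) (m :: acc) =
      m :: post.foldl (fun acc x =>
        PySem.List.insertBy (fun a b => decide (b.1 < a.1)) x acc) acc := by
  intro post
  induction post with
  | nil => intro acc _; rfl
  | cons x post ih =>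
      intro acc hle
      simp only [List.foldl_cons]
      have hx : x.1 ≤ m.1 := hle x (by simp)
      rw [pvInsertByCons]
      rw [if_neg (by simp; omega)]
      exact ih _ (fun y hy => hle y (by simp [hy]))

-- stable reverse sort puts the first maximal element first (abstract form)
lemma pvSortedRevPopAux (pre post : List (Int × String)) (m : Int × String)
    (hstrict : ∀ y ∈ pre, y.1 < m.1) (hmax : ∀ y ∈ post, y.1 ≤ m.1) :
    PySem.List.sorted (pre ++ m :: post) (fun x => x.1) true =
      m :: PySem.List.sorted (pre ++ post) (fun x => x.1) true := by
  rw [PySem.List.sorted_rev_eq_foldl_insertBy, PySem.List.sorted_rev_eq_foldl_insertBy]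
  rw [List.foldl_append, List.foldl_append]
  simp only [List.foldl_cons]
  have hmemPre : ∀ y ∈ pre.foldl (fun acc x =>
      PySem.List.insertBy (fun a b => decide (b.1 < a.1)) x acc) [], y.1 < m.1 := by
    intro y hy
    rcases pvMemFoldlInsertBy _ pre [] y hy with h | h
    · simp at h
    · exact hstrict y h
  rw [pvInsertByFront _ m _ (fun y hy => by simp [hmemPre y hy])]
  exact pvFoldlSkipHead m post _ hmax

-- stable reverse sort puts the first maximal element first (index form)
lemma pvSortedRevPop (l : List (Int × String)) (bn : Nat) (hbn : bn < l.length)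
    (hstrict : ∀ i, i < bn → (l.getD i (0, "")).1 < (l.getD bn (0, "")).1)
    (hmax : ∀ i, i < l.length → (l.getD i (0, "")).1 ≤ (l.getD bn (0, "")).1) :
    PySem.List.sorted l (fun x => x.1) true =
      l.getD bn (0, "") :: PySem.List.sorted (l.take bn ++ l.drop (bn + 1)) (fun x => x.1) true := by
  have hm : l.getD bn (0, "") = l[bn] := List.getD_eq_getElem l _ hbn
  have hdecomp : l = l.take bn ++ l[bn] :: l.drop (bn + 1) := by
    rw [List.getElem_cons_drop, List.take_append_drop]
  have hpre : ∀ y ∈ l.take bn, y.1 < (l[bn] : Int × String).1 := by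
    intro y hy
    rw [List.mem_iff_getElem] at hy
    obtain ⟨j, hj, hyj⟩ := hy
    rw [List.length_take] at hj
    have hjbn : j < bn := by omega
    rw [List.getElem_take] at hyj
    have := hstrict j hjbn
    rw [List.getD_eq_getElem l _ (by omega), hm] at this
    rw [← hyj]; exact this
  have hpost : ∀ y ∈ l.drop (bn + 1), y.1 ≤ (l[bn] : Int × String).1 := by
    intro y hy
    rw [List.mem_iff_getElem] at hy
    obtain ⟨j, hj, hyj⟩ := hy
    rw [List.length_drop] at hj
    rw [List.getElem_drop] at hyj
    have := hmax (bn + 1 + j) (by omega)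
    rw [List.getD_eq_getElem l _ (by omega), hm] at this
    rw [← hyj]; exact this
  rw [hm]
  conv_lhs => rw [hdecomp]
  exact pvSortedRevPopAux _ _ _ hpre hpost

-- A's greedy fold over the sorted list is B's selection loop
lemma pvSelectEq (mc : Int) :
    ∀ (n : Nat) (l : List (Int × String)), l.length = n → ∀ (total : Int) (r : List String),
    ((PySem.List.sorted l (fun x => x.1) true).foldl (pvStep mc) (r, total, false)).1 =
      r ++ pvSelect mc l total := by
  intro n
  induction n using Nat.strong_induction_on with
  | _ n ih =>
    intro l hl total r
    cases l with
    | nil => simp [pvSelect, PySem.List.sorted]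
    | cons x rest =>
      obtain ⟨bn, hbn, hfst, hsnd, hstrict, hmax⟩ := pvPopBestSpec (x :: rest) (by simp)
      rw [pvSortedRevPop (x :: rest) bn hbn hstrict hmax]
      rw [List.foldl_cons]
      rw [pvSelect]
      simp only [← hfst, ← hsnd]
      by_cases hover : total + PySem.Str.len (pvPopBest (x :: rest)).1.2 > mc
      · rw [if_pos hover]
        have hstep : pvStep mc (r, total, false) (pvPopBest (x :: rest)).1 = (r, total, true) := by
          simp only [pvStep]
          rw [if_neg (by simp), if_pos hover]
        rw [hstep, pvStep_stopped]
        simp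
      · rw [if_neg hover]
        have hstep : pvStep mc (r, total, false) (pvPopBest (x :: rest)).1 =
            (r ++ [(pvPopBest (x :: rest)).1.2], total + PySem.Str.len (pvPopBest (x :: rest)).1.2, false) := by
          simp only [pvStep]
          rw [if_neg (by simp), if_neg hover]
        rw [hstep]
        have hlt : (pvPopBest (x :: rest)).2.length < n := by
          rw [← hl]; exact pvPopBest_rest_lt (x :: rest) (by simp)
        rw [ih _ hlt _ rfl]
        simp

-- ===== VERDICT (by name: the statement is the Claim_ definition above) =====
theorem extract_relevant_sections_py_spec : Claim_equal_extract_relevant_sections_py := by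
  intro full_text profile max_chars _
  by_cases hkw : PySem.Dict.getD pvKeywordsByProfile profile [] = []
  · simp [Spec_extract_relevant_sections_py, extract_relevant_sections_py,
      extract_relevant_sections_py_alt, hkw]
  · simp only [Spec_extract_relevant_sections_py, extract_relevant_sections_py,
      extract_relevant_sections_py_alt]
    rw [if_neg hkw, if_neg hkw]
    show (if ((PySem.List.sorted
          ((PySem.List.pyRange 0 (PySem.Str.len full_text) 500).foldl
            (fun sb i =>
              if pvScoreA full_text (PySem.Dict.getD pvKeywordsByProfile profile []) i > 0
              then sb ++ [(pvScoreA full_text (PySem.Dict.getD pvKeywordsByProfile profile []) i,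
                           pvBlockA full_text i)] else sb) [])
          (fun x => x.1) true).foldl (pvStep max_chars) ([], 0, false)).1 = []
        then PySem.Str.slice full_text none (some max_chars)
        else PySem.Str.join "\n...\n"
          ((PySem.List.sorted
            ((PySem.List.pyRange 0 (PySem.Str.len full_text) 500).foldl
              (fun sb i =>
                if pvScoreA full_text (PySem.Dict.getD pvKeywordsByProfile profile []) i > 0
                then sb ++ [(pvScoreA full_text (PySem.Dict.getD pvKeywordsByProfile profile []) i,
                             pvBlockA full_text i)] else sb) [])
            (fun x => x.1) true).foldl (pvStep max_chars) ([], 0, false)).1) =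
      (if pvSelect max_chars
            (pvScanB full_text (PySem.Dict.getD pvKeywordsByProfile profile []) 0) 0 = []
        then PySem.Str.slice full_text none (some max_chars)
        else PySem.Str.join "\n...\n"
          (pvSelect max_chars
            (pvScanB full_text (PySem.Dict.getD pvKeywordsByProfile profile []) 0) 0))
    have hscan : pvScanB full_text (PySem.Dict.getD pvKeywordsByProfile profile []) 0 =
        ((PySem.List.pyRange 0 (PySem.Str.len full_text) 500).filter
            (fun i => decide (pvScoreA full_text (PySem.Dict.getD pvKeywordsByProfile profile []) i > 0))).map
          (fun i => (pvScoreA full_text (PySem.Dict.getD pvKeywordsByProfile profile []) i,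
                     pvBlockA full_text i)) := by
      have := pvScanEqAux full_text (PySem.Dict.getD pvKeywordsByProfile profile [])
        ((PySem.Str.len full_text).toNat - 0) 0 rfl
      simpa using this
    have hsel := pvSelectEq max_chars
      (((PySem.List.pyRange 0 (PySem.Str.len full_text) 500).filter
          (fun i => decide (pvScoreA full_text (PySem.Dict.getD pvKeywordsByProfile profile []) i > 0))).map
        (fun i => (pvScoreA full_text (PySem.Dict.getD pvKeywordsByProfile profile []) i,
                   pvBlockA full_text i))).length _ rfl 0 []
    rw [pvScoredEq, hscan, hsel]
    simp
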